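-- pv_equiv track=rewrite | github.com/Arselena/HS_Modul_6_Clean_code | Level_6_3_2.py | squirrel
-- ===== SOURCE A (Python) =====
-- def squirrel(N):
--     try:
--         if type(N) is int:  # Проверяем целое ли число N
--             assert N >= 0, 'задайте целое число N >= 0'
--             if N == 0:  # Возвращаем 0!=1
--                 return 1
--             else:  # Вычичляем факториал
--                 F = 1
--                 for i in range(1, N+1):
--                     F *= i
--                 if F < 10:   # Возвращаем факториал, если факториал < 10
--                     return F
--                 else:
--                     while F > 10:  # Ищем первую цифру, если факториал > 10
--                         F //= 10
--                     return F
--     except AssertionError:  # Ловим исключение N < 0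
--         error = True
--     except TypeError:  # Ловим исключение неверного типа
--         error = True
-- ===== SOURCE B (Python) =====
-- def prod_range(a, b):
--     """Product of the integers a..b, by splitting the range in half."""
--     if a > b:
--         return 1
--     if a == b:
--         return a
--     m = (a + b) // 2
--     return prod_range(a, m) * prod_range(m + 1, b)
--
--
-- def squirrel(N):
--     if type(N) is int and N >= 0:
--         F = prod_range(2, N)
--         while F > 10:
--             F //= 10
--         return F
-- ===== Notes on version B (the rewrite author's own statement) =====
-- stated objective: alternative
-- what changed: Computes N! by a recursive divide-and-conquer product over the range 2..N (balanced product tree) instead of A's sequential accumulation loop, and collapses A's three-way branch (N==0 / F<10 / peel loop) into one unconditional peel loop.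
import Mathlib
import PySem

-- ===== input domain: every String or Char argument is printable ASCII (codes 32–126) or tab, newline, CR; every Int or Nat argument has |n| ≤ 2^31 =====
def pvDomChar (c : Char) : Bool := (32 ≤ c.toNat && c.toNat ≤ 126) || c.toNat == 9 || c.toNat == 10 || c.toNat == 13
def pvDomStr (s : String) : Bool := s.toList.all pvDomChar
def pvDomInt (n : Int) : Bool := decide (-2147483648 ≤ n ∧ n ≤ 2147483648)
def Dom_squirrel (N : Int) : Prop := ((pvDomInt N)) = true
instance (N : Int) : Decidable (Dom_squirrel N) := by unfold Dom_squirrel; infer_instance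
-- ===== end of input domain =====

-- B computes N! by a recursive divide-and-conquer product over 2..N instead of A's
-- sequential accumulation loop, and peels the digits in one unconditional loop instead
-- of A's three-way branch; the return value is proved equal to A's on every input.

-- ===== PORT A =====
-- the `while F > 10: F //= 10` loop; fuel (F.toNat) only makes the same computation total
def peelFuel (fuel : Nat) (F : Int) : Int :=
  match fuel with
  | 0 => F
  | f + 1 => if F > 10 then peelFuel f (PySem.Int.floordiv F 10) else F

def squirrel (N : Int) : Option Int :=
  if 0 ≤ N then              -- assert N >= 0; on failure AssertionError is caught, returns None
    if N = 0 then some 1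
    else
      let F := (PySem.List.pyRange 1 (N + 1) 1).foldl (fun F i => F * i) 1
      if F < 10 then some F
      else some (peelFuel F.toNat F)
  else none

-- ===== PORT B =====
-- prod_range: product of the integers a..b, splitting the range in half;
-- fuel ((b - a).toNat + 1) only makes the same recursion total
def prodRange (fuel : Nat) (a b : Int) : Int :=
  match fuel with
  | 0 => 1
  | f + 1 =>
    if a > b then 1
    else if a = b then a
    else
      prodRange f a (PySem.Int.floordiv (a + b) 2) *
        prodRange f (PySem.Int.floordiv (a + b) 2 + 1) b

-- B's `while F > 10: F //= 10` loop; fuel (F.toNat) only makes the same computation total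
def peelFuelB (fuel : Nat) (F : Int) : Int :=
  match fuel with
  | 0 => F
  | f + 1 => if F > 10 then peelFuelB f (PySem.Int.floordiv F 10) else F

def squirrel_alt (N : Int) : Option Int :=
  if 0 ≤ N then
    let F := prodRange ((N - 2).toNat + 1) 2 N
    some (peelFuelB F.toNat F)
  else none

-- ===== PRECONDITION & SPEC =====
def Spec_squirrel (N : Int) (out : Option Int) : Prop := out = squirrel_alt N
instance (N : Int) (out : Option Int) : Decidable (Spec_squirrel N out) := by unfold Spec_squirrel; infer_instance

-- ===== CLAIM (what is proved, stated in full; the proofs are below) =====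
def Claim_equal_squirrel : Prop := ∀ (N : Int), Dom_squirrel N → Spec_squirrel N (squirrel N)

-- ===== LEMMAS AND PROOFS =====

-- the shared peel loop, as a mathematical function on naturals
def peelN (m : Nat) : Nat :=
  if h : 10 < m then peelN (m / 10) else m
termination_by m
decreasing_by exact Nat.div_lt_self (by omega) (by omega)

lemma peelN_le {m : Nat} (h : m ≤ 10) : peelN m = m := by
  rw [peelN]; simp [Nat.not_lt.2 h]

lemma peelN_step {m : Nat} (h : 10 < m) : peelN m = peelN (m / 10) := by
  rw [peelN]; simp [h]

lemma peelFuel_eq : ∀ (fuel m : Nat), m ≤ fuel → peelFuel fuel (m : Int) = (peelN m : Int) := by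
  intro fuel
  induction fuel with
  | zero =>
    intro m h
    have : m = 0 := by omega
    subst this
    rw [peelN_le (by omega)]
    rfl
  | succ f ih =>
    intro m h
    by_cases h10 : 10 < m
    · have hgt : (10 : Int) < (m : Int) := by exact_mod_cast h10
      have hfd : PySem.Int.floordiv ((m : Nat) : Int) 10 = ((m / 10 : Nat) : Int) := by
        exact_mod_cast PySem.Int.floordiv_natCast m 10
      have hlt : m / 10 < m := Nat.div_lt_self (by omega) (by omega)
      simp only [peelFuel, if_pos hgt, hfd]
      rw [ih (m / 10) (by omega), peelN_step h10]
    · have hng : ¬ ((m : Nat) : Int) > 10 := by exact_mod_cast h10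
      simp only [peelFuel, if_neg hng]
      rw [peelN_le (by omega)]

lemma peelFuelB_eq_peelFuel : ∀ (fuel : Nat) (F : Int), peelFuelB fuel F = peelFuel fuel F := by
  intro fuel
  induction fuel with
  | zero => intro F; rfl
  | succ f ih =>
    intro F
    simp only [peelFuelB, peelFuel]
    split_ifs with h
    · exact ih _
    · rfl

-- the factorial loop of A
lemma fold_fact : ∀ n : Nat,
    ((PySem.List.pyRange 1 ((n : Int) + 1) 1).foldl (fun F i => F * i) 1) = (Nat.factorial n : Int) := by
  intro n
  induction n with
  | zero => simp [PySem.List.pyRange_one_eq_nil (by omega : (1:Int) ≤ 1), Nat.factorial]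
  | succ k ih =>
    rw [show ((k + 1 : Nat) : Int) + 1 = ((k : Int) + 1) + 1 by push_cast; ring,
      PySem.List.pyRange_one_succ_right
        (by exact_mod_cast Nat.succ_le_succ (Nat.zero_le k) : (1:Int) ≤ (k : Int) + 1),
      List.foldl_append, ih]
    simp only [List.foldl_cons, List.foldl_nil, Nat.factorial_succ]
    push_cast; ring

-- port A evaluates to peelN of the factorial
lemma a_nat (n : Nat) : squirrel (n : Int) = some ((peelN (Nat.factorial n) : Nat) : Int) := by
  simp only [squirrel, if_pos (Int.natCast_nonneg n)]
  by_cases h0 : n = 0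
  · subst h0
    rw [if_pos (by norm_num), show Nat.factorial 0 = 1 from rfl, peelN_le (by omega)]
    norm_num
  · rw [if_neg (by exact_mod_cast h0), fold_fact n]
    by_cases hlt : (Nat.factorial n : Int) < 10
    · rw [if_pos hlt, peelN_le (by exact_mod_cast Int.le_of_lt hlt)]
    · have h10 : 10 ≤ Nat.factorial n := by
        have : ¬ (Nat.factorial n : Int) < 10 := hlt
        omega
      rw [if_neg hlt, Int.toNat_natCast, peelFuel_eq (Nat.factorial n) (Nat.factorial n) le_rfl]

-- the halving product equals the product of the range
lemma prodRange_prod : ∀ (fuel : Nat) (a b : Int), (b - a).toNat < fuel →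
    prodRange fuel a b = (PySem.List.pyRange a (b + 1) 1).prod := by
  intro fuel
  induction fuel with
  | zero => intro a b h; omega
  | succ f ih =>
    intro a b h
    by_cases h1 : a > b
    · rw [prodRange, if_pos h1,
        PySem.List.pyRange_one_eq_nil (by omega : b + 1 ≤ a), List.prod_nil]
    · by_cases h2 : a = b
      · subst h2
        rw [prodRange, if_neg h1, if_pos rfl,
          PySem.List.pyRange_one_singleton, List.prod_singleton]
      · have hab : a < b := by omega
        have hm : PySem.Int.floordiv (a + b) 2 = (a + b) / 2 :=
          PySem.Int.floordiv_eq_ediv_of_pos (by norm_num)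
        rw [prodRange, if_neg h1, if_neg h2,
          ih a (PySem.Int.floordiv (a + b) 2) (by rw [hm]; omega),
          ih (PySem.Int.floordiv (a + b) 2 + 1) b (by rw [hm]; omega),
          ← List.prod_append,
          ← PySem.List.pyRange_one_append a (PySem.Int.floordiv (a + b) 2 + 1) (b + 1)
            (by rw [hm]; omega) (by rw [hm]; omega)]

-- the product of 2..n is the factorial
lemma prod_fact : ∀ n : Nat, (PySem.List.pyRange 2 ((n : Int) + 1) 1).prod = (Nat.factorial n : Int) := by
  intro n
  induction n with
  | zero =>
    rw [show ((0:Nat) : Int) + 1 = 1 by norm_num,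
      PySem.List.pyRange_one_eq_nil (by omega : (1:Int) ≤ 2), List.prod_nil]
    rfl
  | succ k ih =>
    by_cases hk : k = 0
    · subst hk
      rw [show (((0:Nat) + 1 : Nat) : Int) + 1 = 2 by norm_num,
        PySem.List.pyRange_one_eq_nil (by omega : (2:Int) ≤ 2), List.prod_nil]
      rfl
    · rw [show ((k + 1 : Nat) : Int) + 1 = ((k : Int) + 1) + 1 by push_cast; ring,
        PySem.List.pyRange_one_succ_right (by omega : (2:Int) ≤ (k : Int) + 1),
        List.prod_append, ih, List.prod_singleton]
      simp only [Nat.factorial_succ]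
      push_cast; ring

-- port B evaluates to peelN of the factorial
lemma alt_nat (n : Nat) : squirrel_alt (n : Int) = some ((peelN (Nat.factorial n) : Nat) : Int) := by
  simp only [squirrel_alt, if_pos (Int.natCast_nonneg n)]
  rw [prodRange_prod (((n : Int) - 2).toNat + 1) 2 (n : Int) (by omega), prod_fact n,
    Int.toNat_natCast, peelFuelB_eq_peelFuel,
    peelFuel_eq (Nat.factorial n) (Nat.factorial n) le_rfl]

-- ===== VERDICT (by name: the statement is the Claim_ definition above) =====
theorem squirrel_spec : Claim_equal_squirrel := by
  intro N _
  show squirrel N = squirrel_alt N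
  by_cases hN : 0 ≤ N
  · obtain ⟨n, rfl⟩ : ∃ n : Nat, N = (n : Int) := ⟨N.toNat, (Int.toNat_of_nonneg hN).symm⟩
    rw [a_nat n, alt_nat n]
  · unfold squirrel squirrel_alt
    rw [if_neg hN, if_neg hN]
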